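-- pv_equiv track=rewrite | github.com/happypildo/Algorithm_stduy | Algorithms_solution_code/BFS/BFS_SEA_과제문제풀이_contact.py | BFS
-- ===== SOURCE A (Python) =====
-- from collections import deque
--
-- def BFS(graph, start_node):
--     depth_dict = {0: [start_node]}
--     max_depth = 0
--
--     queue = deque()
--     queue.append((start_node, 0))
--
--     is_visited = set()
--     is_visited.add(start_node)
--
--     while queue:
--         item, depth = queue.popleft()
--
--         if graph.get(item, None) is None: continue
--         for neighbor in graph[item]:
--             if neighbor in is_visited: continue
--             is_visited.add(neighbor)
--             queue.append((neighbor, depth+1))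
--             max_depth = depth + 1 if max_depth < depth + 1 else max_depth
--             if depth_dict.get(depth+1, None) is None:
--                 depth_dict[depth+1] = [neighbor]
--             else:
--                 depth_dict[depth+1].append(neighbor)
--
--     return max(depth_dict[max_depth])
-- ===== SOURCE B (Python) =====
-- def BFS(graph, start_node):
--     visited = {start_node}
--     level = [start_node]
--     while True:
--         nxt = []
--         for node in level:
--             for neighbor in graph.get(node, ()):
--                 if neighbor not in visited:
--                     visited.add(neighbor)
--                     nxt.append(neighbor)
--         if not nxt:
--             return max(level)
--         level = nxt
-- ===== Notes on version B (the rewrite author's own statement) =====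
-- stated objective: simpler
-- what changed: Replaces the (node,depth)-tuple queue with max_depth tracking and a depth->nodes dict by a level-synchronous BFS that keeps only the current frontier list and returns max of the last non-empty frontier.
import Mathlib
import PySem

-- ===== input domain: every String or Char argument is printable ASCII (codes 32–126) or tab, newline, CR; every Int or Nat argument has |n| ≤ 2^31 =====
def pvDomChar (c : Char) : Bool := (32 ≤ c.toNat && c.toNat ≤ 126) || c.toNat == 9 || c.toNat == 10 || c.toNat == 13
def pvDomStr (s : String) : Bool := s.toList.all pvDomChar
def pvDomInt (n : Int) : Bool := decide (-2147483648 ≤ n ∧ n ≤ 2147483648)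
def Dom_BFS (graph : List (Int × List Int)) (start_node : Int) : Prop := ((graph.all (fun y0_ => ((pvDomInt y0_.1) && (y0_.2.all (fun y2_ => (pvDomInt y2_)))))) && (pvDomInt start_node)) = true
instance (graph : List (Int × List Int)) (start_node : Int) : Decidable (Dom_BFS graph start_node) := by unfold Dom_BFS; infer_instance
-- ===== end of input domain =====

-- B is a level-synchronous BFS keeping only the current frontier (no (node,depth) queue,
-- no depth dictionary, no max_depth); objective: simpler.

-- ===== PORT A =====
-- pvCands/pvUnvis and the lemmas up to pv_astep_measure exist only to justify termination
-- of A's while-loop (cited in decreasing_by); they play no part in the computed value.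
def pvCands (g : List (Int × List Int)) : List Int :=
  PySem.List.dedup (g.flatMap (fun p => p.2))

def pvUnvis (g : List (Int × List Int)) (v : List Int) : Nat :=
  ((pvCands g).filter (fun x => decide (¬ x ∈ v))).length

theorem pv_filter_add (v : List Int) (x0 : Int) (cs : List Int) (hnd : cs.Nodup)
    (hmem : x0 ∈ cs) (hx : x0 ∉ v) :
    (cs.filter (fun x => decide (¬ x ∈ v ++ [x0]))).length + 1
      = (cs.filter (fun x => decide (¬ x ∈ v))).length := by
  have hperm := List.perm_cons_erase hmem
  have hA := (List.Perm.filter (fun x => decide (¬ x ∈ v ++ [x0])) hperm).length_eq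
  have hB := (List.Perm.filter (fun x => decide (¬ x ∈ v)) hperm).length_eq
  have hcongr : List.filter (fun x => decide (¬ x ∈ v ++ [x0])) (cs.erase x0)
      = List.filter (fun x => decide (¬ x ∈ v)) (cs.erase x0) := by
    refine List.filter_congr (fun x hxm => ?_)
    have hne : x ≠ x0 := (List.Nodup.mem_erase_iff hnd |>.mp hxm).1
    simp [List.mem_append, hne]
  rw [hA, hB, List.filter_cons, List.filter_cons, hcongr]
  have h1 : (decide (¬ x0 ∈ v ++ [x0])) = false := by simp
  have h2 : (decide (¬ x0 ∈ v)) = true := by simpa using hx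
  rw [h1, h2]
  simp

theorem pv_unvis_add (g : List (Int × List Int)) (v : List Int) (x0 : Int)
    (hc : x0 ∈ pvCands g) (hx : x0 ∉ v) :
    pvUnvis g (v ++ [x0]) + 1 = pvUnvis g v :=
  pv_filter_add v x0 (pvCands g) (by simpa [pvCands] using PySem.List.nodup_dedup _) hc hx

theorem pv_get?_sub (g : List (Int × List Int)) (item : Int) (nbrs : List Int)
    (h : (PySem.Dict.mk g).get? item = some nbrs) : ∀ x ∈ nbrs, x ∈ pvCands g := by
  intro x hx
  simp only [pvCands, PySem.List.mem_dedup, List.mem_flatMap]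
  induction g with
  | nil => simp [PySem.Dict.get?] at h
  | cons p g ih =>
    rcases p with ⟨k, l⟩
    rw [PySem.Dict.get?_mk_cons] at h
    by_cases hk : (k == item) = true
    · simp only [hk, if_pos] at h
      have hl : l = nbrs := by injection h
      exact ⟨(k, l), by simp, hl ▸ hx⟩
    · simp only [hk, if_neg, Bool.false_eq_true, not_false_eq_true] at h
      rcases ih h with ⟨q, hq, hxq⟩
      exact ⟨q, by simp [hq], hxq⟩

-- one turn of A's inner `for neighbor in graph[item]` loop (state: queue, visited, depth_dict, max_depth)
def pvAstep (d : Int)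
    (st : List (Int × Int) × List Int × PySem.Dict Int (List Int) × Int) (nb : Int) :
    List (Int × Int) × List Int × PySem.Dict Int (List Int) × Int :=
  if PySem.Set.contains st.2.1 nb then st
  else
    (st.1 ++ [(nb, d + 1)],
     PySem.Set.add st.2.1 nb,
     (match st.2.2.1.get? (d + 1) with
      | none => st.2.2.1.insert (d + 1) [nb]
      | some l => st.2.2.1.insert (d + 1) (l ++ [nb])),
     if st.2.2.2 < d + 1 then d + 1 else st.2.2.2)

theorem pv_astep_measure (g : List (Int × List Int)) (d : Int) :
    ∀ (nbrs : List Int) (q : List (Int × Int)) (v : List Int)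
      (dd : PySem.Dict Int (List Int)) (md : Int),
      (∀ x ∈ nbrs, x ∈ pvCands g) →
      ((nbrs.foldl (pvAstep d) (q, v, dd, md)).1).length
        + pvUnvis g ((nbrs.foldl (pvAstep d) (q, v, dd, md)).2.1)
        ≤ q.length + pvUnvis g v := by
  intro nbrs
  induction nbrs with
  | nil => intro q v dd md _; simp
  | cons nb t ih =>
    intro q v dd md h
    rw [List.foldl_cons]
    by_cases hv : nb ∈ v
    · rw [show pvAstep d (q, v, dd, md) nb = (q, v, dd, md) from by
        simp [pvAstep, hv]]
      exact ih q v dd md (fun x hx => h x (List.mem_cons_of_mem _ hx))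
    · have hstep : pvAstep d (q, v, dd, md) nb
          = (q ++ [(nb, d + 1)], v ++ [nb],
             (match dd.get? (d + 1) with
              | none => dd.insert (d + 1) [nb]
              | some l => dd.insert (d + 1) (l ++ [nb])),
             if md < d + 1 then d + 1 else md) := by
        simp [pvAstep, hv, PySem.Set.add_of_not_mem hv]
      rw [hstep]
      have hih := ih (q ++ [(nb, d + 1)]) (v ++ [nb])
        (match dd.get? (d + 1) with
         | none => dd.insert (d + 1) [nb]
         | some l => dd.insert (d + 1) (l ++ [nb]))
        (if md < d + 1 then d + 1 else md)
        (fun x hx => h x (List.mem_cons_of_mem _ hx))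
      have hm := pv_unvis_add g v nb (h nb (by simp)) hv
      simp only [List.length_append, List.length_cons, List.length_nil] at hih ⊢
      omega

-- A's while-loop; the state is (queue, is_visited, depth_dict, max_depth)
def pvAloop (g : List (Int × List Int)) :
    List (Int × Int) → List Int → PySem.Dict Int (List Int) → Int → Int
  | [], _, dd, md => (PySem.List.max? (dd.getD md []) (fun y => y)).getD 0
  | (item, depth) :: rest, v, dd, md =>
    match h : (PySem.Dict.mk g).get? item with
    | none => pvAloop g rest v dd md
    | some nbrs =>
      let st := nbrs.foldl (pvAstep depth) (rest, v, dd, md)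
      pvAloop g st.1 st.2.1 st.2.2.1 st.2.2.2
termination_by queue v _ _ => queue.length + pvUnvis g v
decreasing_by
  · simp only [List.length_cons]; omega
  · have hsub : ∀ x ∈ nbrs, x ∈ pvCands g := pv_get?_sub g item nbrs h
    have := pv_astep_measure g depth nbrs rest v dd md hsub
    simp only [List.length_cons]
    omega

-- Python `max(depth_dict[max_depth])`: the key is always present and its list non-empty,
-- so `max? … |>.getD 0` computes exactly Python's max there (the defaults are never used).
def BFS (graph : List (Int × List Int)) (start_node : Int) : Int :=
  pvAloop graph [(start_node, 0)]
    (PySem.Set.add PySem.Set.empty start_node)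
    (PySem.Dict.mk [((0 : Int), [start_node])]) 0

-- ===== PORT B =====
-- one turn of B's inner `for neighbor in graph.get(node, ())` loop (state: visited, nxt)
def pvBstep (st : List Int × List Int) (nb : Int) : List Int × List Int :=
  if PySem.Set.contains st.1 nb then st
  else (PySem.Set.add st.1 nb, st.2 ++ [nb])

-- one turn of B's `for node in level` loop
def pvExpand (g : List (Int × List Int)) (st : List Int × List Int) (node : Int) :
    List Int × List Int :=
  ((PySem.Dict.mk g).getD node []).foldl pvBstep st

-- the lemmas up to pv_expand_measure justify termination of B's while-loop (cited in decreasing_by)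
theorem pv_bstep_spec : ∀ (nbrs : List Int) (v a : List Int),
    nbrs.foldl pvBstep (v, a)
      = (v ++ (nbrs.foldl pvBstep (v, [])).2, a ++ (nbrs.foldl pvBstep (v, [])).2) := by
  intro nbrs
  induction nbrs with
  | nil => intro v a; simp
  | cons nb t ih =>
    intro v a
    rw [List.foldl_cons, List.foldl_cons]
    by_cases hv : nb ∈ v
    · rw [show pvBstep (v, a) nb = (v, a) from by simp [pvBstep, hv],
          show pvBstep (v, []) nb = (v, []) from by simp [pvBstep, hv]]
      exact ih v a
    · rw [show pvBstep (v, a) nb = (v ++ [nb], a ++ [nb]) from by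
            simp [pvBstep, hv, PySem.Set.add_of_not_mem hv],
          show pvBstep (v, []) nb = (v ++ [nb], [nb]) from by
            simp [pvBstep, hv, PySem.Set.add_of_not_mem hv]]
      rw [ih (v ++ [nb]) (a ++ [nb]), ih (v ++ [nb]) [nb]]
      simp

theorem pv_bstep_facts : ∀ (nbrs : List Int) (v : List Int),
    ((nbrs.foldl pvBstep (v, [])).2).Nodup ∧
      ∀ x ∈ (nbrs.foldl pvBstep (v, [])).2, x ∈ nbrs ∧ x ∉ v := by
  intro nbrs
  induction nbrs with
  | nil => intro v; simp
  | cons nb t ih =>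
    intro v
    rw [List.foldl_cons]
    by_cases hv : nb ∈ v
    · rw [show pvBstep (v, []) nb = (v, []) from by simp [pvBstep, hv]]
      exact ⟨(ih v).1, fun x hx => ⟨List.mem_cons_of_mem _ ((ih v).2 x hx).1, ((ih v).2 x hx).2⟩⟩
    · rw [show pvBstep (v, []) nb = (v ++ [nb], [nb]) from by
            simp [pvBstep, hv, PySem.Set.add_of_not_mem hv]]
      rw [pv_bstep_spec t (v ++ [nb]) [nb]]
      have hihs := ih (v ++ [nb])
      constructor
      · rw [show ([nb] ++ (t.foldl pvBstep (v ++ [nb], [])).2)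
            = nb :: (t.foldl pvBstep (v ++ [nb], [])).2 from rfl, List.nodup_cons]
        exact ⟨fun hm => by simpa using (hihs.2 nb hm).2, hihs.1⟩
      · intro x hx
        rcases List.mem_append.mp hx with hx | hx
        · simp only [List.mem_singleton] at hx
          subst hx
          exact ⟨by simp, hv⟩
        · have := hihs.2 x hx
          exact ⟨List.mem_cons_of_mem _ this.1, fun hm => this.2 (by simp [hm])⟩

theorem pv_getD_sub (g : List (Int × List Int)) (node : Int) :
    ∀ x ∈ (PySem.Dict.mk g).getD node [], x ∈ pvCands g := by
  intro x hx
  rw [PySem.Dict.getD_eq_get?_getD] at hx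
  cases hg : (PySem.Dict.mk g).get? node with
  | none => rw [hg] at hx; simp at hx
  | some l => rw [hg] at hx; exact pv_get?_sub g node l hg x hx

theorem pv_expand_spec (g : List (Int × List Int)) : ∀ (level : List Int) (v a : List Int),
    level.foldl (pvExpand g) (v, a)
      = (v ++ (level.foldl (pvExpand g) (v, []) ).2, a ++ (level.foldl (pvExpand g) (v, [])).2) := by
  intro level
  induction level with
  | nil => intro v a; simp
  | cons node t ih =>
    intro v a
    have h1 : pvExpand g (v, a) node
        = (v ++ (List.foldl pvBstep (v, []) ((PySem.Dict.mk g).getD node [])).2,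
           a ++ (List.foldl pvBstep (v, []) ((PySem.Dict.mk g).getD node [])).2) :=
      pv_bstep_spec _ v a
    have h0 : pvExpand g (v, []) node
        = (v ++ (List.foldl pvBstep (v, []) ((PySem.Dict.mk g).getD node [])).2,
           [] ++ (List.foldl pvBstep (v, []) ((PySem.Dict.mk g).getD node [])).2) :=
      pv_bstep_spec _ v []
    rw [List.foldl_cons, List.foldl_cons, h1, h0]
    rw [ih (v ++ (List.foldl pvBstep (v, []) ((PySem.Dict.mk g).getD node [])).2)
          (a ++ (List.foldl pvBstep (v, []) ((PySem.Dict.mk g).getD node [])).2),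
        ih (v ++ (List.foldl pvBstep (v, []) ((PySem.Dict.mk g).getD node [])).2)
          ([] ++ (List.foldl pvBstep (v, []) ((PySem.Dict.mk g).getD node [])).2)]
    simp

theorem pv_expand_facts (g : List (Int × List Int)) : ∀ (level : List Int) (v : List Int),
    ((level.foldl (pvExpand g) (v, [])).2).Nodup ∧
      ∀ x ∈ (level.foldl (pvExpand g) (v, [])).2, x ∈ pvCands g ∧ x ∉ v := by
  intro level
  induction level with
  | nil => intro v; simp
  | cons node t ih =>
    intro v
    have h0 : pvExpand g (v, []) node
        = (v ++ (List.foldl pvBstep (v, []) ((PySem.Dict.mk g).getD node [])).2,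
           [] ++ (List.foldl pvBstep (v, []) ((PySem.Dict.mk g).getD node [])).2) :=
      pv_bstep_spec _ v []
    rw [List.foldl_cons, h0, List.nil_append,
        pv_expand_spec g t (v ++ (List.foldl pvBstep (v, []) ((PySem.Dict.mk g).getD node [])).2)
          ((List.foldl pvBstep (v, []) ((PySem.Dict.mk g).getD node [])).2)]
    have hw := pv_bstep_facts ((PySem.Dict.mk g).getD node []) v
    have hu := ih (v ++ (List.foldl pvBstep (v, []) ((PySem.Dict.mk g).getD node [])).2)
    constructor
    · rw [List.nodup_append]
      refine ⟨hw.1, hu.1, ?_⟩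
      intro a ha b hb heq
      subst heq
      exact (hu.2 a hb).2 (List.mem_append.mpr (Or.inr ha))
    · intro x hx
      rcases List.mem_append.mp hx with hx | hx
      · exact ⟨pv_getD_sub g node x (hw.2 x hx).1, (hw.2 x hx).2⟩
      · exact ⟨(hu.2 x hx).1, fun hm => (hu.2 x hx).2 (List.mem_append.mpr (Or.inl hm))⟩

theorem pv_unvis_append (g : List (Int × List Int)) : ∀ (w v : List Int), w.Nodup →
    (∀ x ∈ w, x ∈ pvCands g ∧ x ∉ v) →
    pvUnvis g (v ++ w) + w.length = pvUnvis g v := by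
  intro w
  induction w with
  | nil => intro v _ _; simp
  | cons x w ih =>
    intro v hnd hf
    rw [List.nodup_cons] at hnd
    have h1 := pv_unvis_add g v x (hf x (by simp)).1 (hf x (by simp)).2
    have h2 := ih (v ++ [x]) hnd.2 (by
      intro y hy
      refine ⟨(hf y (by simp [hy])).1, ?_⟩
      intro hm
      rcases List.mem_append.mp hm with hm | hm
      · exact (hf y (by simp [hy])).2 hm
      · simp only [List.mem_singleton] at hm
        exact hnd.1 (hm ▸ hy))
    have he : v ++ x :: w = (v ++ [x]) ++ w := by simp
    rw [he]
    simp only [List.length_cons]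
    omega

theorem pv_expand_measure (g : List (Int × List Int)) (level : List Int) (v : List Int)
    (h : (level.foldl (pvExpand g) (v, [])).2 ≠ []) :
    pvUnvis g ((level.foldl (pvExpand g) (v, [])).1) < pvUnvis g v := by
  have hspec := pv_expand_spec g level v []
  have hf := pv_expand_facts g level v
  have hcnt := pv_unvis_append g ((level.foldl (pvExpand g) (v, [])).2) v hf.1 hf.2
  have hlen : 0 < ((level.foldl (pvExpand g) (v, [])).2).length := List.length_pos_of_ne_nil h
  have h1 : (level.foldl (pvExpand g) (v, [])).1 = v ++ (level.foldl (pvExpand g) (v, [])).2 := by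
    conv_lhs => rw [hspec]
  rw [h1]
  omega

-- B's while-loop: level-synchronous frontier expansion
def pvBloop (g : List (Int × List Int)) (level : List Int) (v : List Int) : Int :=
  if h : (level.foldl (pvExpand g) (v, [])).2 = [] then
    (PySem.List.max? level (fun y => y)).getD 0
  else pvBloop g ((level.foldl (pvExpand g) (v, [])).2) ((level.foldl (pvExpand g) (v, [])).1)
termination_by pvUnvis g v
decreasing_by
  simp only [List.foldl_attach] at h ⊢
  exact pv_expand_measure g level v h

def BFS_alt (graph : List (Int × List Int)) (start_node : Int) : Int :=
  pvBloop graph [start_node] (PySem.Set.add PySem.Set.empty start_node)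

-- ===== PRECONDITION & SPEC =====
def Spec_BFS (graph : List (Int × List Int)) (start_node : Int) (out : Int) : Prop := out = BFS_alt graph start_node
instance (graph : List (Int × List Int)) (start_node : Int) (out : Int) : Decidable (Spec_BFS graph start_node out) := by unfold Spec_BFS; infer_instance

-- ===== CLAIM (what is proved, stated in full; the proofs are below) =====
def Claim_equal_BFS : Prop := ∀ (graph : List (Int × List Int)) (start_node : Int), Dom_BFS graph start_node → Spec_BFS graph start_node (BFS graph start_node)

-- ===== LEMMAS AND PROOFS =====
theorem pvAloop_nil (g : List (Int × List Int)) (v : List Int)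
    (dd : PySem.Dict Int (List Int)) (md : Int) :
    pvAloop g [] v dd md = (PySem.List.max? (dd.getD md []) (fun y => y)).getD 0 := by
  rw [pvAloop]

theorem pvAloop_cons_none (g : List (Int × List Int)) (item depth : Int)
    (rest : List (Int × Int)) (v : List Int) (dd : PySem.Dict Int (List Int)) (md : Int)
    (h : (PySem.Dict.mk g).get? item = none) :
    pvAloop g ((item, depth) :: rest) v dd md = pvAloop g rest v dd md := by
  rw [pvAloop]
  split <;> simp_all

theorem pvAloop_cons_some (g : List (Int × List Int)) (item depth : Int)
    (rest : List (Int × Int)) (v : List Int) (dd : PySem.Dict Int (List Int)) (md : Int)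
    (nbrs : List Int) (h : (PySem.Dict.mk g).get? item = some nbrs) :
    pvAloop g ((item, depth) :: rest) v dd md
      = pvAloop g (nbrs.foldl (pvAstep depth) (rest, v, dd, md)).1
          (nbrs.foldl (pvAstep depth) (rest, v, dd, md)).2.1
          (nbrs.foldl (pvAstep depth) (rest, v, dd, md)).2.2.1
          (nbrs.foldl (pvAstep depth) (rest, v, dd, md)).2.2.2 := by
  rw [pvAloop]
  split <;> simp_all

theorem pv_astep_spec (d : Int) : ∀ (nbrs : List Int) (q : List (Int × Int)) (v : List Int)
    (dd : PySem.Dict Int (List Int)) (md : Int),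
    ∃ dd', nbrs.foldl (pvAstep d) (q, v, dd, md)
        = (q ++ ((nbrs.foldl pvBstep (v, [])).2).map (fun x => (x, d + 1)),
           v ++ (nbrs.foldl pvBstep (v, [])).2,
           dd',
           if (nbrs.foldl pvBstep (v, [])).2 = [] then md else if md < d + 1 then d + 1 else md)
      ∧ dd'.getD (d + 1) [] = dd.getD (d + 1) [] ++ (nbrs.foldl pvBstep (v, [])).2
      ∧ ∀ k, k ≠ d + 1 → dd'.getD k [] = dd.getD k [] := by
  intro nbrs
  induction nbrs with
  | nil =>
    intro q v dd md
    exact ⟨dd, by simp, by simp, fun k _ => rfl⟩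
  | cons nb t ih =>
    intro q v dd md
    by_cases hv : nb ∈ v
    · have ha : pvAstep d (q, v, dd, md) nb = (q, v, dd, md) := by simp [pvAstep, hv]
      have hb : pvBstep (v, []) nb = (v, []) := by simp [pvBstep, hv]
      simp only [List.foldl_cons, ha, hb]
      exact ih q v dd md
    · have ha : pvAstep d (q, v, dd, md) nb
          = (q ++ [(nb, d + 1)], v ++ [nb],
             dd.insert (d + 1) (dd.getD (d + 1) [] ++ [nb]),
             if md < d + 1 then d + 1 else md) := by
        cases hdd : dd.get? (d + 1) with
        | none =>
          simp [pvAstep, hv, PySem.Set.add_of_not_mem hv, hdd, PySem.Dict.getD_eq_get?_getD]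
        | some l =>
          simp [pvAstep, hv, PySem.Set.add_of_not_mem hv, hdd, PySem.Dict.getD_eq_get?_getD]
      have hb : pvBstep (v, []) nb = (v ++ [nb], [nb]) := by
        simp [pvBstep, hv, PySem.Set.add_of_not_mem hv]
      simp only [List.foldl_cons, ha, hb]
      rcases ih (q ++ [(nb, d + 1)]) (v ++ [nb])
          (dd.insert (d + 1) (dd.getD (d + 1) [] ++ [nb]))
          (if md < d + 1 then d + 1 else md) with ⟨dd', heq, h1, h2⟩
      rw [pv_bstep_spec t (v ++ [nb]) [nb]]
      refine ⟨dd', ?_, ?_, ?_⟩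
      · rw [heq]
        have hmd : (if (t.foldl pvBstep (v ++ [nb], [])).2 = []
              then (if md < d + 1 then d + 1 else md)
              else if (if md < d + 1 then d + 1 else md) < d + 1 then d + 1
                else (if md < d + 1 then d + 1 else md))
            = (if md < d + 1 then d + 1 else md) := by
          split_ifs <;> omega
        rw [hmd]
        simp [List.append_assoc]
      · rw [h1]
        simp [PySem.Dict.getD_insert, List.append_assoc]
      · intro k hk
        rw [h2 k hk, PySem.Dict.getD_insert]
        simp [hk]

theorem pv_G1 (g : List (Int × List Int)) :
    ∀ (rest built v : List Int) (dd : PySem.Dict Int (List Int)) (md d : Int),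
    md = (if built = [] then d else d + 1) →
    dd.getD (d + 1) [] = built →
    (((rest.foldl (pvExpand g) (v, built)).2 = [] ∧
        pvAloop g (rest.map (fun x => (x, d)) ++ built.map (fun x => (x, d + 1))) v dd md
          = (PySem.List.max? (dd.getD d []) (fun y => y)).getD 0)
     ∨ ((rest.foldl (pvExpand g) (v, built)).2 ≠ [] ∧
        ∃ dd', pvAloop g (rest.map (fun x => (x, d)) ++ built.map (fun x => (x, d + 1))) v dd md
            = pvAloop g (((rest.foldl (pvExpand g) (v, built)).2).map (fun x => (x, d + 1)))
                ((rest.foldl (pvExpand g) (v, built)).1) dd' (d + 1)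
          ∧ dd'.getD (d + 1) [] = (rest.foldl (pvExpand g) (v, built)).2
          ∧ ∀ k, k ≠ d + 1 → dd'.getD k [] = dd.getD k [])) := by
  intro rest
  induction rest with
  | nil =>
    intro built v dd md d hmd hdd
    by_cases hb : built = []
    · subst hb
      left
      refine ⟨by simp, ?_⟩
      simp only [if_pos rfl] at hmd
      subst hmd
      simp [pvAloop_nil]
    · right
      refine ⟨by simpa using hb, dd, ?_, by simpa using hdd, fun k _ => rfl⟩
      rw [hmd, if_neg hb]
      simp
  | cons x rest' ih =>
    intro built v dd md d hmd hdd
    cases hx : (PySem.Dict.mk g).get? x with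
    | none =>
      have hstep : pvExpand g (v, built) x = (v, built) := by
        simp [pvExpand, PySem.Dict.getD_eq_get?_getD, hx]
      have hal := pvAloop_cons_none g x d (rest'.map (fun y => (y, d)) ++ built.map (fun y => (y, d + 1))) v dd md hx
      simp only [List.foldl_cons, hstep, List.map_cons, List.cons_append, hal]
      exact ih built v dd md d hmd hdd
    | some nbrs =>
      have hgetD : (PySem.Dict.mk g).getD x [] = nbrs := by
        rw [PySem.Dict.getD_eq_get?_getD, hx]; rfl
      have hstep : pvExpand g (v, built) x
          = (v ++ (nbrs.foldl pvBstep (v, [])).2, built ++ (nbrs.foldl pvBstep (v, [])).2) := by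
        rw [pvExpand, hgetD]
        exact pv_bstep_spec nbrs v built
      rcases pv_astep_spec d nbrs (rest'.map (fun y => (y, d)) ++ built.map (fun y => (y, d + 1))) v dd md
        with ⟨dd2, heq2, hdd2a, hdd2b⟩
      have hal := pvAloop_cons_some g x d (rest'.map (fun y => (y, d)) ++ built.map (fun y => (y, d + 1))) v dd md nbrs hx
      rw [heq2] at hal
      have hq : (rest'.map (fun y => (y, d)) ++ built.map (fun y => (y, d + 1)))
            ++ ((nbrs.foldl pvBstep (v, [])).2).map (fun y => (y, d + 1))
          = rest'.map (fun y => (y, d))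
            ++ (built ++ (nbrs.foldl pvBstep (v, [])).2).map (fun y => (y, d + 1)) := by
        simp [List.append_assoc]
      have hmd2 : (if (nbrs.foldl pvBstep (v, [])).2 = [] then md else if md < d + 1 then d + 1 else md)
          = (if built ++ (nbrs.foldl pvBstep (v, [])).2 = [] then d else d + 1) := by
        by_cases h1 : (nbrs.foldl pvBstep (v, [])).2 = []
        · by_cases h2 : built = [] <;> simp [h1, h2, hmd] <;> omega
        · have : ¬ (built ++ (nbrs.foldl pvBstep (v, [])).2 = []) := by
            intro hcon
            exact h1 (List.append_eq_nil_iff.mp hcon).2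
          by_cases h2 : built = [] <;> simp [h1, h2, hmd, this] <;> omega
      rw [hq, hmd2] at hal
      have hih := ih (built ++ (nbrs.foldl pvBstep (v, [])).2)
        (v ++ (nbrs.foldl pvBstep (v, [])).2) dd2
        (if built ++ (nbrs.foldl pvBstep (v, [])).2 = [] then d else d + 1) d rfl
        (by rw [hdd2a, hdd])
      have hfold : (x :: rest').foldl (pvExpand g) (v, built)
          = rest'.foldl (pvExpand g)
              (v ++ (nbrs.foldl pvBstep (v, [])).2, built ++ (nbrs.foldl pvBstep (v, [])).2) := by
        rw [List.foldl_cons, hstep]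
      rcases hih with ⟨hnil, heqn⟩ | ⟨hne, dd', heq', hprop1, hprop2⟩
      · left
        refine ⟨by rw [hfold]; exact hnil, ?_⟩
        rw [show ((x, d) :: (rest'.map (fun y => (y, d)) ++ built.map (fun y => (y, d + 1))))
            = ((x :: rest').map (fun y => (y, d)) ++ built.map (fun y => (y, d + 1))) from by simp] at hal
        rw [hal, heqn, hdd2b d (by omega)]
      · right
        refine ⟨by rw [hfold]; exact hne, dd', ?_, ?_, ?_⟩
        · rw [show ((x :: rest').map (fun y => (y, d)) ++ built.map (fun y => (y, d + 1)))
              = ((x, d) :: (rest'.map (fun y => (y, d)) ++ built.map (fun y => (y, d + 1)))) from by simp]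
          rw [hal, heq', hfold]
        · rw [hfold]; exact hprop1
        · intro k hk
          rw [hprop2 k hk, hdd2b k hk]

theorem pv_G0 (g : List (Int × List Int)) : ∀ (n : Nat) (v L : List Int)
    (dd : PySem.Dict Int (List Int)) (d : Int),
    pvUnvis g v = n → L ≠ [] → dd.getD d [] = L → (∀ k, d < k → dd.getD k [] = []) →
    pvAloop g (L.map (fun x => (x, d))) v dd d = pvBloop g L v := by
  intro n
  induction n using Nat.strong_induction_on with
  | _ n ih =>
    intro v L dd d hn hL hdL hk
    have hdd : dd.getD (d + 1) [] = ([] : List Int) := hk (d + 1) (by omega)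
    have h1 := pv_G1 g L [] v dd d d (by simp) hdd
    simp only [List.map_nil, List.append_nil] at h1
    rcases h1 with ⟨hnil, heq⟩ | ⟨hne, dd', heq, hdd1, hdd2⟩
    · rw [pvBloop, dif_pos hnil, heq, hdL]
    · rw [pvBloop, dif_neg hne, heq]
      have hlt : pvUnvis g ((L.foldl (pvExpand g) (v, [])).1) < n :=
        hn ▸ pv_expand_measure g L v hne
      exact ih _ hlt ((L.foldl (pvExpand g) (v, [])).1) ((L.foldl (pvExpand g) (v, [])).2) dd'
        (d + 1) rfl hne hdd1
        (fun k hk2 => by rw [hdd2 k (by omega)]; exact hk k (by omega))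

-- ===== VERDICT (by name: the statement is the Claim_ definition above) =====
theorem BFS_spec : Claim_equal_BFS := by
  intro graph s _
  unfold Spec_BFS BFS BFS_alt
  have hv0 : PySem.Set.add PySem.Set.empty s = [s] := by
    rw [PySem.Set.add_of_not_mem (by simp [PySem.Set.empty])]
    rfl
  rw [hv0]
  have hq : [((s : Int), (0 : Int))] = [s].map (fun x => (x, (0 : Int))) := rfl
  rw [hq]
  refine pv_G0 graph (pvUnvis graph [s]) [s] [s] (PySem.Dict.mk [((0 : Int), [s])]) 0 rfl (by simp) ?_ ?_
  · simp [PySem.Dict.getD_eq_get?_getD, PySem.Dict.get?_mk_cons]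
  · intro k hkk
    have h0 : ((0 : Int) == k) = false := by
      simp only [beq_eq_false_iff_ne, ne_eq]
      omega
    simp [PySem.Dict.getD_eq_get?_getD, PySem.Dict.get?_mk_cons, h0, PySem.Dict.get?]
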